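-- pv_equiv track=rewrite | github.com/nickhoulahan/medlit-assist | src/medlit_agent/agent/agent.py | _extract_partial_json_string
-- ===== SOURCE A (Python) =====
-- from typing import Any, AsyncIterator, Dict, List, Optional
--
-- def _extract_partial_json_string(raw_text: str, key: str) -> str | None:
--     key_pos = raw_text.find(f'"{key}"')
--     if key_pos == -1:
--         return None
--
--     colon_pos = raw_text.find(":", key_pos)
--     if colon_pos == -1:
--         return None
--
--     start_quote = raw_text.find('"', colon_pos)
--     if start_quote == -1:
--         return None
--
--     chars: List[str] = []
--     escaped = False
--     idx = start_quote + 1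
--     while idx < len(raw_text):
--         ch = raw_text[idx]
--         if escaped:
--             chars.append("\\" + ch)
--             escaped = False
--             idx += 1
--             continue
--
--         if ch == "\\":
--             escaped = True
--             idx += 1
--             continue
--
--         if ch == '"':
--             break
--
--         chars.append(ch)
--         idx += 1
--
--     return "".join(chars)
-- ===== SOURCE B (Python) =====
-- import re
--
-- # greedy match of a (possibly unterminated) JSON string body: escaped pairs or plain chars
-- _PARTIAL_STRING_BODY = re.compile(r'(?:\\[\s\S]|[^"\\])*')
--
--
-- def _extract_partial_json_string(raw_text: str, key: str) -> str | None:
--     # locate the quoted key, then work only on successively smaller suffixes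
--     _, key_sep, after_key = raw_text.partition(f'"{key}"')
--     if not key_sep:
--         return None
--     from_key = key_sep + after_key
--     _, colon_sep, after_colon = from_key.partition(":")
--     if not colon_sep:
--         return None
--     from_colon = colon_sep + after_colon
--     _, quote_sep, body = from_colon.partition('"')
--     if not quote_sep:
--         return None
--     return _PARTIAL_STRING_BODY.match(body).group(0)
-- ===== Notes on version B (the rewrite author's own statement) =====
-- stated objective: idiomatic
-- what changed: Replaces A's index-based find() chain and hand-written while-loop escape state machine (escaped flag, per-char append) with a str.partition suffix chain and a single compiled-regex match (?:\\[\s\S]|[^"\\])* that extracts the partial string body in one call.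
import Mathlib
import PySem

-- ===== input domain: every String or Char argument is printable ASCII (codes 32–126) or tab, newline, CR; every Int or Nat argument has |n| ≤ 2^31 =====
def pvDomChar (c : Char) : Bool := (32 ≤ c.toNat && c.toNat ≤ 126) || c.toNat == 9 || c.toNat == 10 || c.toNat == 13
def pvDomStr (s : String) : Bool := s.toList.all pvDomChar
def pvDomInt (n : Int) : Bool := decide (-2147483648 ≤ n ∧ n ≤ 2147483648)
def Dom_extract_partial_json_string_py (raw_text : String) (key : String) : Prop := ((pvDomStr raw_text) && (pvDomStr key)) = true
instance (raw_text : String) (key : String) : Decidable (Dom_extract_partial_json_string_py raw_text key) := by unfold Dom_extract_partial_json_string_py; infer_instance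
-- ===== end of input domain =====

-- B replaces A's index-based find() chain and escaped-flag while-loop state machine with a
-- partition-based suffix chain and one greedy regex match (objective: idiomatic).

-- ===== PORT A =====
-- A's while-loop over idx with the `escaped` flag, as recursion on the suffix list.
def pvALoop : List Char → Bool → List Char
  | [], _ => []
  | c :: rest, escaped =>
    if escaped then '\\' :: c :: pvALoop rest false
    else if c = '\\' then pvALoop rest true
    else if c = '"' then []
    else c :: pvALoop rest false

def extract_partial_json_string_py (raw_text : String) (key : String) : Option String :=
  let key_pos := PySem.Str.find raw_text ("\"" ++ key ++ "\"")
  if key_pos = -1 then none else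
  let colon_pos := PySem.Str.findFrom raw_text ":" key_pos
  if colon_pos = -1 then none else
  let start_quote := PySem.Str.findFrom raw_text "\"" colon_pos
  if start_quote = -1 then none else
  some (String.ofList (pvALoop (raw_text.toList.drop (start_quote.toNat + 1)) false))

-- ===== PORT B =====
-- Source B's str.partition(pat): pvPartSuffix? returns the suffix of the list starting at the
-- FIRST occurrence of pat (none if absent); Source B's `sep + after` re-glues the separator onto
-- the tail, which is exactly this inclusive suffix.
def pvPartSuffix? (pat : List Char) : List Char → Option (List Char)
  | [] => if pat.isPrefixOf [] then some [] else none
  | c :: t => if pat.isPrefixOf (c :: t) then some (c :: t) else pvPartSuffix? pat t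

-- Hand-port of Source B's regex (?:\\[\s\S]|[^"\\])* matched at the start of `body`: the two
-- alternatives are disjoint and each consumes ≥ 1 char, so the greedy (longest-prefix)
-- match is computed exactly by this deterministic scan.
def pvReStar : List Char → List Char
  | [] => []
  | c :: rest =>
    if c = '\\' then
      match rest with
      | [] => []                                    -- lone trailing backslash: neither alternative matches
      | c2 :: rest2 => '\\' :: c2 :: pvReStar rest2 -- alternative \\[\s\S]
    else if c = '"' then []
    else c :: pvReStar rest                         -- alternative [^"\\]

def extract_partial_json_string_py_alt (raw_text : String) (key : String) : Option String :=
  match pvPartSuffix? ('"' :: key.toList ++ ['"']) raw_text.toList with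
  | none => none
  | some from_key =>
    match pvPartSuffix? [':'] from_key with
    | none => none
    | some from_colon =>
      match pvPartSuffix? ['"'] from_colon with
      | none => none
      | some from_quote => some (String.ofList (pvReStar (from_quote.drop 1)))

-- ===== PRECONDITION & SPEC =====
def Spec_extract_partial_json_string_py (raw_text : String) (key : String) (out : Option String) : Prop := out = extract_partial_json_string_py_alt raw_text key
instance (raw_text : String) (key : String) (out : Option String) : Decidable (Spec_extract_partial_json_string_py raw_text key out) := by unfold Spec_extract_partial_json_string_py; infer_instance

-- ===== CLAIM (what is proved, stated in full; the proofs are below) =====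
def Claim_equal_extract_partial_json_string_py : Prop := ∀ (raw_text : String) (key : String), Dom_extract_partial_json_string_py raw_text key → Spec_extract_partial_json_string_py raw_text key (extract_partial_json_string_py raw_text key)

-- ===== LEMMAS AND PROOFS =====

-- the two body scans agree
theorem pvALoop_eq_pvReStar : ∀ (n : Nat) (l : List Char), l.length ≤ n →
    pvALoop l false = pvReStar l ∧
    pvALoop l true = (match l with | [] => [] | c :: r => '\\' :: c :: pvReStar r) := by
  intro n
  induction n with
  | zero =>
    intro l h
    cases l with
    | nil => exact ⟨rfl, rfl⟩
    | cons c rest => simp at h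
  | succ n ih =>
    intro l h
    cases l with
    | nil => exact ⟨rfl, rfl⟩
    | cons c rest =>
      have hr : rest.length ≤ n := by simp at h; omega
      refine ⟨?_, ?_⟩
      · by_cases h1 : c = '\\'
        · subst h1
          cases rest with
          | nil => rw [pvReStar.eq_def]; simp [pvALoop]
          | cons c2 r2 =>
            have hr2 : r2.length ≤ n := by simp at hr ⊢; omega
            rw [pvReStar.eq_def]; simp [pvALoop, (ih r2 hr2).1]
        · by_cases h2 : c = '"'
          · subst h2
            rw [pvReStar.eq_def]; simp [pvALoop]
          · rw [pvReStar.eq_def]; simp [pvALoop, h1, h2, (ih rest hr).1]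
      · simp [pvALoop, (ih rest hr).1]

theorem pvALoop_false (l : List Char) : pvALoop l false = pvReStar l :=
  (pvALoop_eq_pvReStar l.length l le_rfl).1

-- pvPartSuffix? finds no suffix iff pat is not an infix
theorem pvPartSuffix?_eq_none_iff (pat : List Char) : ∀ (l : List Char),
    pvPartSuffix? pat l = none ↔ ¬ pat <:+: l := by
  intro l
  induction l with
  | nil =>
    by_cases h : pat = [] <;>
      simp [pvPartSuffix?, List.isPrefixOf_iff_prefix, List.prefix_nil, List.infix_nil, h]
  | cons c t ih =>
    simp only [pvPartSuffix?]
    split <;> rename_i h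
    · simp only [List.isPrefixOf_iff_prefix] at h
      simp [h.isInfix]
    · simp only [List.isPrefixOf_iff_prefix] at h
      rw [ih, List.infix_cons_iff]
      tauto

-- when pat occurs first at index j, pvPartSuffix? returns the suffix from j
theorem pvPartSuffix?_eq_some (pat : List Char) : ∀ (l : List Char) (j : Nat),
    pat <+: l.drop j → (∀ i, i < j → ¬ pat <+: l.drop i) →
    pvPartSuffix? pat l = some (l.drop j) := by
  intro l
  induction l with
  | nil =>
    intro j hp _
    simp only [List.drop_nil] at hp ⊢
    have : pat = [] := List.prefix_nil.mp hp
    simp [pvPartSuffix?, this]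
  | cons c t ih =>
    intro j hp hmin
    cases j with
    | zero =>
      simp only [List.drop_zero] at hp ⊢
      simp [pvPartSuffix?, List.isPrefixOf_iff_prefix, hp]
    | succ k =>
      have h0 : ¬ pat <+: (c :: t) := by simpa using hmin 0 (Nat.succ_pos k)
      simp only [pvPartSuffix?, List.isPrefixOf_iff_prefix, h0, if_false, List.drop_succ_cons]
      exact ih k hp (fun i hi => by simpa using hmin (i + 1) (by omega))

-- pvPartSuffix? computed from Chars.find: none iff find = -1, else the suffix at find's index
theorem pvPartSuffix?_eq_find (pat l : List Char) :
    pvPartSuffix? pat l =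
      if PySem.Chars.find l pat = -1 then none
      else some (l.drop (PySem.Chars.find l pat).toNat) := by
  by_cases h : PySem.Chars.find l pat = -1
  · rw [if_pos h, pvPartSuffix?_eq_none_iff]
    exact (PySem.Chars.find_eq_neg_one_iff _ _).mp h
  · rw [if_neg h]
    have h0 : 0 ≤ PySem.Chars.find l pat := by
      rw [PySem.Chars.find_nonneg_iff]
      exact (PySem.Chars.find_ne_neg_one_iff _ _).mp h
    obtain ⟨hp, hmin⟩ := PySem.Chars.find_spec h0
    exact pvPartSuffix?_eq_some pat l _ hp hmin

-- ===== VERDICT (by name: the statement is the Claim_ definition above) =====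
theorem extract_partial_json_string_py_spec : Claim_equal_extract_partial_json_string_py := by
  intro raw_text key _
  unfold Spec_extract_partial_json_string_py
  unfold extract_partial_json_string_py extract_partial_json_string_py_alt
  simp only [PySem.Str.find_eq, PySem.Str.findFrom_eq, pvPartSuffix?_eq_find]
  set l := raw_text.toList with hl
  have hpat : ("\"" ++ key ++ "\"").toList = '"' :: key.toList ++ ['"'] := by simp
  have hcolonToList : (":" : String).toList = [':'] := by decide
  have hquoteToList : ("\"" : String).toList = ['"'] := by decide
  rw [hpat, hcolonToList, hquoteToList]
  set pat := '"' :: key.toList ++ ['"'] with hpatdef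
  -- step 1: the key
  by_cases h1 : PySem.Chars.find l pat = -1
  · simp [h1]
  · have h1n : 0 ≤ PySem.Chars.find l pat := by
      rw [PySem.Chars.find_nonneg_iff]; exact (PySem.Chars.find_ne_neg_one_iff _ _).mp h1
    obtain ⟨n1, hn1⟩ : ∃ n : Nat, PySem.Chars.find l pat = (n : Int) :=
      ⟨(PySem.Chars.find l pat).toNat, (Int.toNat_of_nonneg h1n).symm⟩
    have hn1len : n1 ≤ l.length := by
      have := PySem.Chars.find_le_length l pat; omega
    have hx1 : ¬ ((n1 : Int) = -1) := by omega
    -- step 2: the colon (searched from the key position in both programs)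
    by_cases h2 : PySem.Chars.find (l.drop n1) [':'] = -1
    · have hf2 : PySem.Chars.findFrom l [':'] ((n1 : Nat) : Int) = -1 := by
        rw [PySem.Chars.findFrom_natCast l [':'] n1 hn1len, if_pos h2]
      simp [hn1, hx1, hf2, h2, Int.toNat_natCast]
    · have h2n : 0 ≤ PySem.Chars.find (l.drop n1) [':'] := by
        rw [PySem.Chars.find_nonneg_iff]; exact (PySem.Chars.find_ne_neg_one_iff _ _).mp h2
      obtain ⟨n2, hn2⟩ : ∃ n : Nat, PySem.Chars.find (l.drop n1) [':'] = (n : Int) :=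
        ⟨(PySem.Chars.find (l.drop n1) [':']).toNat, (Int.toNat_of_nonneg h2n).symm⟩
      have hn2len : n1 + n2 ≤ l.length := by
        have := PySem.Chars.find_le_length (l.drop n1) [':']
        rw [List.length_drop] at this; omega
      have hf2 : PySem.Chars.findFrom l [':'] ((n1 : Nat) : Int) = ((n1 + n2 : Nat) : Int) := by
        rw [PySem.Chars.findFrom_natCast l [':'] n1 hn1len, if_neg h2, hn2]; push_cast; ring
      have hx2 : ¬ (((n1 + n2 : Nat) : Int) = -1) := by omega
      -- step 3: the opening quote (searched from the colon position in both programs)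
      by_cases h3 : PySem.Chars.find (l.drop (n1 + n2)) ['"'] = -1
      · have hf3 : PySem.Chars.findFrom l ['"'] (((n1 + n2 : Nat)) : Int) = -1 := by
          rw [PySem.Chars.findFrom_natCast l ['"'] (n1 + n2) hn2len, if_pos h3]
        have h3' : PySem.Chars.find (l.drop (n2 + n1)) ['"'] = -1 := by
          rw [Nat.add_comm]; exact h3
        have hxn2 : ¬ ((n2 : Int) = -1) := by omega
        simp only [hn1, hf2, hf3, hx1, hx2, Int.toNat_natCast]
        simp [hn2, hxn2, h3]
      · have h3n : 0 ≤ PySem.Chars.find (l.drop (n1 + n2)) ['"'] := by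
          rw [PySem.Chars.find_nonneg_iff]; exact (PySem.Chars.find_ne_neg_one_iff _ _).mp h3
        obtain ⟨n3, hn3⟩ : ∃ n : Nat, PySem.Chars.find (l.drop (n1 + n2)) ['"'] = (n : Int) :=
          ⟨(PySem.Chars.find (l.drop (n1 + n2)) ['"']).toNat, (Int.toNat_of_nonneg h3n).symm⟩
        have hf3 : PySem.Chars.findFrom l ['"'] (((n1 + n2 : Nat)) : Int) = ((n1 + n2 + n3 : Nat) : Int) := by
          rw [PySem.Chars.findFrom_natCast l ['"'] (n1 + n2) hn2len, if_neg h3, hn3]; push_cast; ring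
        have hx3 : ¬ (((n1 + n2 + n3 : Nat) : Int) = -1) := by omega
        have hxn2 : ¬ ((n2 : Int) = -1) := by omega
        have hxn3 : ¬ ((n3 : Int) = -1) := by omega
        simp only [hn1, hf2, hf3, Int.toNat_natCast]
        have hy2 : ¬ ((n1 : Int) + (n2 : Int) = -1) := by omega
        have hy3 : ¬ ((n1 : Int) + (n2 : Int) + (n3 : Int) = -1) := by omega
        simp [hn2, hn3, hxn2, hxn3, hy2, hy3, pvALoop_false, List.drop_drop]
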